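-- pv_equiv track=rewrite | github.com/pypi-data/pypi-mirror-137 | packages/revwordmainsym/revwordmainsym-0.0.1.tar.gz/revwordmainsym-0.0.1/src/revwordmainsym.py | manipulate
-- ===== SOURCE A (Python) =====
-- def conCatElements(Array):
-- 	word = ''
-- 	for element in Array:
-- 		word+=element
-- 	return word
--
-- def manipulate(userInput):
-- 	symbolAndPosition = {}
-- 	filteredWord = []
-- 	symbols = "`~!@#$%^&*()_-=+{}[]';:|\"/><.,"
--
-- 	# Filtering symbol from word
-- 	for userInputCount in range(0,len(userInput)):
-- 		if userInput[userInputCount] in symbols: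
-- 			symbolAndPosition[userInputCount]=userInput[userInputCount]
--
-- 		else:
-- 			filteredWord.append(userInput[userInputCount])
--
-- 	# Reversing filtered Word
-- 	filteredWord = filteredWord[::-1]
--
-- 	# Adding symbols back to their original position
-- 	for symbolIndex, symbolValue in symbolAndPosition.items():
-- 		filteredWord.insert(symbolIndex, symbolValue)
--
-- 	return conCatElements(filteredWord)
-- ===== SOURCE B (Python) =====
-- def manipulate(userInput):
-- 	symbols = "`~!@#$%^&*()_-=+{}[]';:|\"/><.,"
-- 	# one pass: letters (non-symbols) reversed fill the non-symbol slots in order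
-- 	rev = iter([c for c in userInput if c not in symbols][::-1])
-- 	return ''.join(c if c in symbols else next(rev) for c in userInput)
-- ===== Notes on version B (the rewrite author's own statement) =====
-- stated objective: alternative
-- what changed: Replaces the dict-of-symbol-positions plus repeated list.insert reconstruction (each insert shifts the tail) with a single pass that keeps symbols in place and fills the remaining slots from an iterator over the reversed non-symbol characters.
import Mathlib
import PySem

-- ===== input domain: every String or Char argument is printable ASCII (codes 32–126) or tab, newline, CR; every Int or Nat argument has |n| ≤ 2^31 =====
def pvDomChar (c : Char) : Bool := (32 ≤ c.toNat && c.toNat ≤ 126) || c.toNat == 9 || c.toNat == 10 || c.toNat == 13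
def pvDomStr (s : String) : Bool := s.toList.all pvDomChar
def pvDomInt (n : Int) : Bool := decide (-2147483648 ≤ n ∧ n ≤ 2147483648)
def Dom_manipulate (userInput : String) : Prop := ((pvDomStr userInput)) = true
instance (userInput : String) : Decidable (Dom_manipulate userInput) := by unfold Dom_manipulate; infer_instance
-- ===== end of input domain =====

-- B replaces A's symbol-position dict + repeated list.insert reconstruction with a single
-- pass that keeps symbols in place and fills the other slots from the reversed non-symbols.

-- the symbols literal both Pythons share
def pvSymbols : List Char := "`~!@#$%^&*()_-=+{}[]';:|\"/><.,".toList

-- ===== PORT A =====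
-- word = ''; for element in Array: word += element   (over the chars of the result list)
def conCatElements (arr : List Char) : List Char :=
  arr.foldl (fun word element => word ++ [element]) []

def manipulate (userInput : String) : String :=
  let s := userInput.toList
  -- for userInputCount in range(0, len(userInput)): symbols into the dict, the rest into the list
  let st := (PySem.List.pyRange 0 ((s.length : Nat) : Int) 1).foldl
    (fun (st : PySem.Dict Int Char × List Char) i =>
      -- userInput[userInputCount]: i ∈ range(0, len) is always in range, the default is never read
      let c := PySem.List.pyGetD s i ' '
      if pvSymbols.contains c then (st.1.insert i c, st.2)
      else (st.1, st.2 ++ [c]))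
    (PySem.Dict.empty, [])
  -- filteredWord = filteredWord[::-1]  (step -1 ≠ 0, so slice? is always some)
  let filteredWord := (PySem.List.slice? st.2 none none (-1)).getD []
  -- for symbolIndex, symbolValue in symbolAndPosition.items(): filteredWord.insert(...)
  let result := st.1.items.foldl (fun acc p => PySem.List.insert acc p.1 p.2) filteredWord
  String.ofList (conCatElements result)

-- ===== PORT B =====
-- ''.join(c if c in symbols else next(rev) for c in userInput); the [] branch is next() on an
-- exhausted iterator, never reached because the count of non-symbols equals rev's length.
def fillRev : List Char → List Char → List Char
  | [], _ => []
  | c :: t, r =>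
    if pvSymbols.contains c then c :: fillRev t r
    else
      match r with
      | [] => []
      | x :: r' => x :: fillRev t r'

def manipulate_alt (userInput : String) : String :=
  let s := userInput.toList
  -- rev = iter([c for c in userInput if c not in symbols][::-1])
  let rev := (s.filter (fun c => !pvSymbols.contains c)).reverse
  String.ofList (fillRev s rev)

-- ===== PRECONDITION & SPEC =====
def Spec_manipulate (userInput : String) (out : String) : Prop := out = manipulate_alt userInput
instance (userInput : String) (out : String) : Decidable (Spec_manipulate userInput out) := by unfold Spec_manipulate; infer_instance

-- ===== CLAIM (what is proved, stated in full; the proofs are below) =====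
def Claim_equal_manipulate : Prop := ∀ (userInput : String), Dom_manipulate userInput → Spec_manipulate userInput (manipulate userInput)

-- ===== LEMMAS AND PROOFS =====

-- the (index, symbol-char) pairs of a char list, indices starting at k (A's dict as a list)
def symPairs : List Char → Nat → List (Nat × Char)
  | [], _ => []
  | c :: t, i => if pvSymbols.contains c then (i, c) :: symPairs t (i + 1) else symPairs t (i + 1)

-- list.insert at a non-negative index commutes with cons (index shifted by one)
theorem insert_cons (X : List Char) (c v : Char) (i : Nat) :
    PySem.List.insert (c :: X) ((i : Int) + 1) v = c :: PySem.List.insert X (i : Int) v := by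
  simp only [PySem.List.insert, PySem.List.sliceIndices, List.length_cons]
  have h1 : ¬((i:Int) + 1 < 0) := by omega
  have h2 : ¬((i:Int) < 0) := by omega
  have h5 : ¬((1:Int) < 0) := by omega
  rw [if_neg h1, if_neg h2, if_neg h5, if_neg h5]
  have h3 : (min ((i:Int)+1) (((X.length + 1 : Nat)):Int)).toNat
      = (min (i:Int) (X.length:Int)).toNat + 1 := by push_cast; omega
  rw [h3, List.take_succ_cons, List.drop_succ_cons]
  simp

theorem symPairs_shift (t : List Char) : ∀ k : Nat,
    symPairs t (k + 1) = (symPairs t k).map (fun p => (p.1 + 1, p.2)) := by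
  induction t with
  | nil => intro k; simp [symPairs]
  | cons c t ih =>
    intro k
    by_cases h : c ∈ pvSymbols <;> simp [symPairs, h, ih (k+1)]

theorem symPairs_lb (t : List Char) : ∀ k : Nat, ∀ p ∈ symPairs t k, k ≤ p.1 := by
  induction t with
  | nil => intro k p hp; simp [symPairs] at hp
  | cons c t ih =>
    intro k p hp
    by_cases h : c ∈ pvSymbols <;> simp [symPairs, h] at hp
    · rcases hp with rfl | hp
      · simp
      · exact Nat.le_of_succ_le (ih (k+1) p hp)
    · exact Nat.le_of_succ_le (ih (k+1) p hp)

theorem symPairs_pairwise (t : List Char) : ∀ k : Nat,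
    (symPairs t k).Pairwise (fun p q => p.1 < q.1) := by
  induction t with
  | nil => intro k; simp [symPairs]
  | cons c t ih =>
    intro k
    by_cases h : c ∈ pvSymbols
    · have hsp : symPairs (c :: t) k = (k, c) :: symPairs t (k+1) := by simp [symPairs, h]
      rw [hsp]
      exact List.Pairwise.cons
        (fun q hq => Nat.lt_of_lt_of_le (Nat.lt_succ_self k) (symPairs_lb t (k+1) q hq)) (ih (k+1))
    · have hsp : symPairs (c :: t) k = symPairs t (k+1) := by simp [symPairs, h]
      rw [hsp]; exact ih (k+1)

-- inserting at indices shifted by one into (c :: X) keeps c in front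
theorem fold_shift (ps : List (Nat × Char)) : ∀ (X : List Char) (c : Char),
    ((ps.map (fun p => (p.1 + 1, p.2))).foldl
      (fun acc (p : Nat × Char) => PySem.List.insert acc (p.1 : Int) p.2) (c :: X))
    = c :: ps.foldl (fun acc (p : Nat × Char) => PySem.List.insert acc (p.1 : Int) p.2) X := by
  induction ps with
  | nil => intro X c; simp
  | cons p ps ih =>
    intro X c
    simp only [List.map_cons, List.foldl_cons]
    rw [show ((p.1 + 1 : Nat) : Int) = ((p.1 : Nat) : Int) + 1 by push_cast; ring,
        insert_cons, ih]

-- A's reconstruction-by-insert equals B's single fill pass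
theorem fold_eq_fill (s : List Char) : ∀ R : List Char,
    R.length = (s.filter (fun c => !pvSymbols.contains c)).length →
    (symPairs s 0).foldl (fun acc (p : Nat × Char) => PySem.List.insert acc (p.1 : Int) p.2) R
      = fillRev s R := by
  induction s with
  | nil =>
    intro R hR
    simp [List.filter] at hR
    simp [symPairs, fillRev, hR]
  | cons c t ih =>
    intro R hR
    by_cases h : c ∈ pvSymbols
    · have hsp : symPairs (c :: t) 0 = (0, c) :: symPairs t 1 := by simp [symPairs, h]
      have hfil : (c :: t).filter (fun c => !pvSymbols.contains c)
          = t.filter (fun c => !pvSymbols.contains c) := by simp [List.filter, h]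
      rw [hsp, List.foldl_cons]
      simp only [Nat.cast_zero, PySem.List.insert_zero]
      rw [show (1 : Nat) = 0 + 1 by rfl, symPairs_shift, fold_shift]
      rw [ih R (by rw [hR, hfil])]
      simp [fillRev, h]
    · have hsp : symPairs (c :: t) 0 = symPairs t 1 := by simp [symPairs, h]
      have hfil : (c :: t).filter (fun c => !pvSymbols.contains c)
          = c :: t.filter (fun c => !pvSymbols.contains c) := by simp [List.filter, h]
      rw [hfil] at hR
      cases R with
      | nil => simp at hR
      | cons x R' =>
        simp only [List.length_cons, Nat.add_right_cancel_iff] at hR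
        rw [hsp, show (1 : Nat) = 0 + 1 by rfl, symPairs_shift, fold_shift]
        rw [ih R' hR]
        simp [fillRev, h]

-- A's filtering loop: the dict is the fold of symPairs inserts, the list is the filter
theorem loopA (s : List Char) : ∀ (suf pre : List Char), s = pre ++ suf →
    ∀ (d : PySem.Dict Int Char) (acc : List Char),
    (PySem.List.pyRange ((pre.length : Nat) : Int) ((s.length : Nat) : Int) 1).foldl
      (fun (st : PySem.Dict Int Char × List Char) i =>
        let c := PySem.List.pyGetD s i ' '
        if pvSymbols.contains c then (st.1.insert i c, st.2)
        else (st.1, st.2 ++ [c])) (d, acc)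
    = ((symPairs suf pre.length).foldl (fun d (p : Nat × Char) => d.insert (p.1 : Int) p.2) d,
       acc ++ suf.filter (fun c => !pvSymbols.contains c)) := by
  intro suf
  induction suf with
  | nil =>
    intro pre hs d acc
    subst hs
    simp [PySem.List.pyRange, symPairs]
  | cons c t ih =>
    intro pre hs d acc
    have hlen : (pre.length : Int) < (s.length : Int) := by subst hs; simp
    rw [PySem.List.pyRange_one_cons hlen, List.foldl_cons]
    have hget : PySem.List.pyGetD s ((pre.length : Nat) : Int) ' ' = c := by
      subst hs; simp
    simp only [hget]
    have hcast : ((pre.length : Nat) : Int) + 1 = (((pre ++ [c]).length : Nat) : Int) := by simp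
    by_cases h : c ∈ pvSymbols
    · have hb : pvSymbols.contains c = true := by simpa using h
      rw [if_pos hb, hcast]
      rw [ih (pre ++ [c]) (by simp [hs]) (d.insert ((pre.length : Nat) : Int) c) acc]
      have hsp : symPairs (c :: t) pre.length = (pre.length, c) :: symPairs t (pre.length + 1) := by
        simp [symPairs, h]
      rw [hsp, List.foldl_cons]
      simp [h]
    · rw [if_neg (by simpa using h), hcast]
      rw [ih (pre ++ [c]) (by simp [hs]) d (acc ++ [c])]
      have hsp : symPairs (c :: t) pre.length = symPairs t (pre.length + 1) := by
        simp [symPairs, h]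
      rw [hsp]
      simp [h]

-- ===== VERDICT (by name: the statement is the Claim_ definition above) =====
theorem manipulate_spec : Claim_equal_manipulate := by
  intro u _
  have h1 := loopA u.toList u.toList [] rfl PySem.Dict.empty []
  simp only [List.length_nil, Nat.cast_zero, List.nil_append] at h1
  have hnodup : ((symPairs u.toList 0).map (fun p => ((p.1 : Nat) : Int))).Nodup := by
    have hp : ((symPairs u.toList 0).map (fun p => ((p.1 : Nat) : Int))).Pairwise (· < ·) :=
      (symPairs_pairwise u.toList 0).map _ (fun {a b} hab => by exact_mod_cast hab)
    exact hp.imp ne_of_lt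
  have hitems := PySem.Dict.items_foldl_insert_fresh (symPairs u.toList 0)
    (fun p => ((p.1 : Nat) : Int)) (fun p => p.2) PySem.Dict.empty
    (fun a _ => by simp [PySem.Dict.contains_empty]) hnodup
  simp only [show (PySem.Dict.empty : PySem.Dict Int Char).items = [] from rfl,
    List.nil_append] at hitems
  have hfill := fold_eq_fill u.toList
    ((u.toList.filter (fun c => !pvSymbols.contains c)).reverse) (by simp)
  show manipulate u = manipulate_alt u
  unfold manipulate manipulate_alt conCatElements
  simp only [h1, hitems, PySem.List.slice?_none_none_neg_one, Option.getD_some,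
    List.foldl_map, PySem.List.foldl_append_singleton_eq_self, List.nil_append, hfill]
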